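-- pv_equiv track=rewrite | github.com/coddingyun/coddingtest | programmers/17685.py | solution
-- ===== SOURCE A (Python) =====
-- def solution(words):
--     answer = 0
--     for word in words:
--         r = False
--         for j in range(len(word)):
--             i = 0
--             for i in range(len(words)):
--                 if word == words[i]:
--                     continue
--                 if len(words[i]) > j and word[j] == words[i][j] and word[:j] == words[i][:j]:
--                     answer += 1
--                     if j == len(word) - 1:
--                         r = True
--                     break
--
--                 if i == len(words) - 1:
--                     break
--         if r!= True:
--             answer += 1
--     if len(words) == 1:
--       return len(words[0])
--     return answer
-- ===== SOURCE B (Python) =====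
-- def solution(words):
--     if len(words) == 1:
--         return len(words[0])
--     # flattened trie: count, for every prefix of every distinct word, how many distinct words pass it
--     prefixes = [w[:j + 1] for w in set(words) for j in range(len(w))]
--     counts = {}
--     for p in prefixes:
--         counts[p] = counts.get(p, 0) + 1
--     answer = 0
--     for w in words:
--         cost = len(w)
--         for j in range(len(w)):
--             if counts.get(w[:j + 1], 0) == 1:
--                 cost = j + 1
--                 break
--         answer += max(1, cost)
--     return answer
-- ===== Notes on version B (the rewrite author's own statement) =====
-- stated objective: faster
-- what changed: Replaces A's triple loop (for every word, for every position, rescan all words comparing sliced prefixes) by a prefix-count dictionary (a flattened trie) built once over the distinct words, so each word's keystroke count is a single walk down its own prefixes until its count drops to 1.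
import Mathlib
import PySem

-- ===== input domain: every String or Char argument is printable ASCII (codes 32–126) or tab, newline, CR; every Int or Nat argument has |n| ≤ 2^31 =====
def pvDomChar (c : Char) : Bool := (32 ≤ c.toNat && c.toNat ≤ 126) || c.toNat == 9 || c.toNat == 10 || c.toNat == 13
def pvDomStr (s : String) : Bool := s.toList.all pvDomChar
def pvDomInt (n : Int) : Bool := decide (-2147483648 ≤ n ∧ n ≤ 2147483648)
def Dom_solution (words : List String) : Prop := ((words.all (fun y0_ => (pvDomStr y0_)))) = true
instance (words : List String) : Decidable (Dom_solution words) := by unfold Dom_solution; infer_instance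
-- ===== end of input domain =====

-- B replaces A's triple loop by a prefix-count dictionary (flattened trie) built once over the
-- distinct words: one walk down each word's own prefixes until its pass count drops to 1 (faster).


-- ===== PORT A =====
/-- A's innermost `for i in range(len(words))` loop: only `words[i]` is read and `i` runs over all
indices, so it is ported as structural recursion over `words`. It returns `true` iff the match
branch (`answer += 1; break`) fired. The trailing `if i == len(words) - 1: break` of the Python
only ends the loop at its final step, where the loop ends anyway, so it is a no-op. -/
def solInner (words : List String) (word : String) (j : Int) : Bool :=
  match words with
  | [] => false
  | w :: rest =>
    if word == w then solInner rest word j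
    else if (decide (PySem.Str.len w > j))
            && (PySem.Str.pyGet? word j == PySem.Str.pyGet? w j)
            && (PySem.Str.slice word none (some j) == PySem.Str.slice w none (some j))
    then true
    else solInner rest word j

def solution (words : List String) : Int :=
  let answer : Int :=
    words.foldl (fun answer word =>
      -- `for j in range(len(word))`, carrying the pair (answer, r)
      let st : Int × Bool :=
        (PySem.List.pyRange 0 (PySem.Str.len word)).foldl
          (fun st j =>
            if solInner words word j then
              (st.1 + 1, if j == PySem.Str.len word - 1 then true else st.2)
            else st)
          (answer, false)
      if st.2 != true then st.1 + 1 else st.1) 0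
  -- `words[0]` exists because this branch has `len(words) == 1`
  if words.length == 1 then PySem.Str.len words.headI else answer

-- ===== PORT B =====
/-- `[w[:j+1] for w in set(words) for j in range(len(w))]` (consumed only as a counter below, so
the set's iteration order cannot influence the result). -/
def solPrefixes (words : List String) : List String :=
  (PySem.Set.ofList words).flatMap (fun w =>
    (PySem.List.pyRange 0 (PySem.Str.len w)).map
      (fun j => PySem.Str.slice w none (some (j + 1))))

/-- B's `for j in range(len(w)): if counts.get(w[:j+1], 0) == 1: cost = j + 1; break`
(first-hit recursion over the range list; `[]` returns the initial `cost = len(w)`). -/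
def solCost (counts : PySem.Dict String Int) (w : String) : List Int → Int
  | [] => PySem.Str.len w
  | j :: rest =>
    if counts.getD (PySem.Str.slice w none (some (j + 1))) 0 == 1 then j + 1
    else solCost counts w rest

def solution_alt (words : List String) : Int :=
  if words.length == 1 then PySem.Str.len words.headI
  else
    let counts : PySem.Dict String Int :=
      (solPrefixes words).foldl (fun d p => d.insert p (d.getD p 0 + 1)) PySem.Dict.empty
    words.foldl (fun answer w =>
      answer + max 1 (solCost counts w (PySem.List.pyRange 0 (PySem.Str.len w)))) 0

-- ===== PRECONDITION & SPEC =====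
def Spec_solution (words : List String) (out : Int) : Prop := out = solution_alt words
instance (words : List String) (out : Int) : Decidable (Spec_solution words out) := by unfold Spec_solution; infer_instance

-- ===== CLAIM (what is proved, stated in full; the proofs are below) =====
def Claim_equal_solution : Prop := ∀ (words : List String), Dom_solution words → Spec_solution words (solution words)

-- ===== LEMMAS AND PROOFS =====

/-- Some other word of `words` shares the length-`k` prefix of `w` (an `abbrev`, so the
`Decidable` instance is found automatically). -/
abbrev QPred (words : List String) (w : String) (k : Nat) : Prop :=
  ∃ w' ∈ words, w' ≠ w ∧ w.toList.take k <+: w'.toList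

theorem QPred_antitone {words : List String} {w : String} {k : Nat}
    (h : QPred words w (k + 1)) : QPred words w k := by
  obtain ⟨w', hmem, hne, hpre⟩ := h
  exact ⟨w', hmem, hne, (List.take_prefix_take_left (Nat.le_succ k)).trans hpre⟩

theorem take_succ_prefix_iff {s t : List Char} {j : Nat} (hj : j < s.length) :
    (j < t.length ∧ s[j]? = t[j]? ∧ s.take j = t.take j) ↔ s.take (j + 1) <+: t := by
  constructor
  · rintro ⟨hjt, hget, htake⟩
    have h1 : s.take (j + 1) = t.take (j + 1) := by
      rw [List.take_add_one, List.take_add_one, hget, htake]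
    rw [h1]; exact List.take_prefix _ _
  · intro hpre
    have hlen : (s.take (j + 1)).length = j + 1 := by
      simp [List.length_take]; omega
    have hjt : j < t.length := by
      have := hpre.length_le; omega
    have h1 : s.take (j + 1) = t.take (j + 1) := by
      have := List.prefix_iff_eq_take.mp hpre
      rwa [hlen] at this
    refine ⟨hjt, ?_, ?_⟩
    · have := congrArg (fun l => l[j]?) h1
      simpa [List.getElem?_take_of_lt (by omega : j < j + 1)] using this
    · have := congrArg (fun l => l.take j) h1
      simpa [List.take_take] using this

/-- A's three-way comparison at position `j` says exactly: `w'` carries the length-`j+1`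
prefix of `w`. -/
theorem cond_iff {w w' : String} {j : Nat} (hj : j < w.toList.length) :
    ((decide (PySem.Str.len w' > (j : Int)))
      && (PySem.Str.pyGet? w (j : Int) == PySem.Str.pyGet? w' (j : Int))
      && (PySem.Str.slice w none (some (j : Int)) == PySem.Str.slice w' none (some (j : Int)))) = true
      ↔ w.toList.take (j + 1) <+: w'.toList := by
  rw [← take_succ_prefix_iff hj]
  simp only [Bool.and_eq_true, decide_eq_true_eq, beq_iff_eq, PySem.Str.len_eq,
    PySem.Str.pyGet?_natCast]
  constructor
  · rintro ⟨⟨h1, h2⟩, h3⟩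
    refine ⟨by exact_mod_cast h1, h2, ?_⟩
    have := congrArg String.toList h3
    simpa [PySem.Str.toList_slice, PySem.List.slice_to_natCast] using this
  · rintro ⟨h1, h2, h3⟩
    refine ⟨⟨by exact_mod_cast h1, h2⟩, ?_⟩
    apply String.toList_inj.mp
    simpa [PySem.Str.toList_slice, PySem.List.slice_to_natCast] using h3

theorem solInner_iff {words : List String} {w : String} {j : Nat}
    (hj : j < w.toList.length) :
    solInner words w (j : Int) = true ↔ QPred words w (j + 1) := by
  induction words with
  | nil => simp [solInner]
  | cons w' rest ih =>
    rw [solInner]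
    split_ifs with h1 h2
    · rw [ih]
      have hww : w = w' := beq_iff_eq.mp h1
      constructor
      · rintro ⟨x, hx, hne, hp⟩; exact ⟨x, List.mem_cons_of_mem _ hx, hne, hp⟩
      · rintro ⟨x, hx, hne, hp⟩
        rcases List.mem_cons.mp hx with h | h
        · exact absurd (h.trans hww.symm) hne
        · exact ⟨x, h, hne, hp⟩
    · simp only [true_iff]
      refine ⟨w', List.mem_cons_self, fun he => h1 (beq_iff_eq.mpr he.symm), ?_⟩
      exact (cond_iff hj).mp h2
    · rw [ih]
      constructor
      · rintro ⟨x, hx, hne, hp⟩; exact ⟨x, List.mem_cons_of_mem _ hx, hne, hp⟩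
      · rintro ⟨x, hx, hne, hp⟩
        rcases List.mem_cons.mp hx with h | h
        · subst h; exact absurd ((cond_iff hj).mpr hp) h2
        · exact ⟨x, h, hne, hp⟩

/-- A's `j`-loop, generically: the pair fold counts the hits and records a hit at `c`. -/
theorem foldA_eq (f : Int → Bool) (c : Int) (L : List Int) (a : Int) (b : Bool) :
    L.foldl (fun st j => if f j then (st.1 + 1, if j == c then true else st.2) else st) (a, b)
      = (a + (L.countP f : Int), b || L.any (fun j => f j && j == c)) := by
  induction L generalizing a b with
  | nil => simp
  | cons x L ih =>
    simp only [List.foldl_cons, List.countP_cons, List.any_cons]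
    by_cases hf : f x
    · simp only [hf, if_true]
      by_cases hc : x == c
      · rw [if_pos hc, ih]
        simp [hc]; ring
      · rw [if_neg (by simpa using hc), ih]
        simp [hc]; ring
    · rw [if_neg (by simp [hf]), ih]; simp [hf]

theorem antitone_downward {p : Nat → Bool} (hmono : ∀ k, p (k + 1) = true → p k = true) :
    ∀ i k, i ≤ k → p k = true → p i = true := by
  intro i k hik hk
  induction k with
  | zero => simpa [Nat.le_zero.mp hik]
  | succ n ih =>
    rcases Nat.lt_or_ge i (n + 1) with h | h
    · exact ih (by omega) (hmono n hk)
    · have : i = n + 1 := by omega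
      simpa [this]

/-- An antitone Boolean predicate holds on `range N` exactly on the initial segment of
length `countP`. -/
theorem countP_antitone_iff {p : Nat → Bool} (hmono : ∀ k, p (k + 1) = true → p k = true)
    (N j : Nat) (hj : j < N) :
    p j = true ↔ j < (List.range N).countP p := by
  induction N with
  | zero => omega
  | succ n ih =>
    rw [List.range_succ, List.countP_append]
    by_cases hn : p n
    · have hall : ∀ x ∈ List.range n, p x = true := by
        intro x hx
        exact antitone_downward hmono x n (by simpa using (List.mem_range.mp hx).le) hn
      rw [List.countP_eq_length.mpr hall]
      constructor
      · intro _; simp [hn]; omega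
      · intro _
        exact antitone_downward hmono j n (by omega) hn
    · simp only [List.countP_cons, hn, List.countP_nil]
      rcases Nat.lt_or_ge j n with h | h
      · rw [ih h]; simp
      · have hjn : j = n := by omega
        subst hjn
        simp only [hn, Bool.false_eq_true, false_iff]
        have hle : (List.range j).countP p ≤ j := by
          simpa using List.countP_le_length (p := p) (l := List.range j)
        simp only [if_false, Nat.add_zero]
        omega

theorem slice_toList_take (w : String) (i : Nat) :
    (PySem.Str.slice w none (some ((i : Int) + 1))).toList = w.toList.take (i + 1) := by
  rw [show ((i : Int) + 1) = ((i + 1 : Nat) : Int) from by push_cast; ring]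
  simp only [PySem.Str.toList_slice, PySem.Chars.slice_eq_listSlice]
  exact PySem.List.slice_to_natCast _ _

/-- Each distinct word contributes the prefix `w[:j+1]` to B's prefix list exactly once —
namely iff it carries that prefix. -/
theorem count_prefixList {w w' : String} {j : Nat} (hj : j < w.toList.length) :
    List.count (PySem.Str.slice w none (some ((j : Int) + 1)))
        ((PySem.List.pyRange 0 (PySem.Str.len w')).map
          (fun i => PySem.Str.slice w' none (some (i + 1))))
      = if w.toList.take (j + 1) <+: w'.toList then 1 else 0 := by
  rw [PySem.Str.len_eq, PySem.List.pyRange_zero_natCast, List.map_map,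
    List.count_eq_countP, List.countP_map]
  have hpred : ∀ i ∈ List.range w'.toList.length,
      ((fun x => x == PySem.Str.slice w none (some ((j : Int) + 1))) ∘
        (fun i : Int => PySem.Str.slice w' none (some (i + 1))) ∘ (fun k : Nat => (k : Int))) i = true
      ↔ (fun i : Nat => decide (i = j ∧ w.toList.take (j + 1) <+: w'.toList)) i = true := by
    intro i hi
    have hi' : i < w'.toList.length := List.mem_range.mp hi
    simp only [Function.comp_apply, beq_iff_eq, decide_eq_true_eq]
    constructor
    · intro h
      have h' : w'.toList.take (i + 1) = w.toList.take (j + 1) := by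
        have h2 := congrArg String.toList h
        rw [slice_toList_take, slice_toList_take] at h2
        exact h2
      have hlen : i + 1 = j + 1 := by
        have hl := congrArg List.length h'
        rw [List.length_take, List.length_take] at hl
        omega
      have hij : i = j := by omega
      subst hij
      exact ⟨rfl, h'.symm ▸ List.take_prefix _ _⟩
    · rintro ⟨hij, hpre⟩
      subst hij
      apply String.toList_inj.mp
      rw [slice_toList_take, slice_toList_take]
      have h1 := List.prefix_iff_eq_take.mp hpre
      have hlen : (w.toList.take (i + 1)).length = i + 1 := by
        rw [List.length_take]; omega
      rw [hlen] at h1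
      exact h1.symm
  rw [List.countP_congr hpred]
  by_cases hC : w.toList.take (j + 1) <+: w'.toList
  · have hjn : j < w'.toList.length := by
      have h2 := hC.length_le
      rw [List.length_take] at h2
      omega
    rw [if_pos hC]
    have heq : (fun i : Nat => decide (i = j ∧ w.toList.take (j + 1) <+: w'.toList))
        = (fun i : Nat => i == j) := by
      funext i
      by_cases hij : i = j <;> simp [hij, hC]
    rw [heq, ← List.count_eq_countP, List.count_range, if_pos hjn]
  · rw [if_neg hC]
    apply List.countP_eq_zero.mpr
    intro i _
    simp [hC]

theorem countP_nodup_one_iff {S : List String} {w : String} {p : String → Bool}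
    (hnd : S.Nodup) (hw : w ∈ S) (hpw : p w = true) :
    (S.countP p = 1) ↔ ¬ ∃ w' ∈ S, w' ≠ w ∧ p w' = true := by
  rw [List.countP_eq_length_filter]
  have hwf : w ∈ S.filter p := List.mem_filter.mpr ⟨hw, hpw⟩
  have hndf : (S.filter p).Nodup := hnd.filter p
  constructor
  · intro h1 hex
    obtain ⟨w', hw', hne, hpw'⟩ := hex
    obtain ⟨x, hx⟩ := List.length_eq_one_iff.mp h1
    rw [hx] at hwf
    have hwx : w = x := by simpa using hwf
    have hw'f : w' ∈ S.filter p := List.mem_filter.mpr ⟨hw', hpw'⟩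
    rw [hx] at hw'f
    have hw'x : w' = x := by simpa using hw'f
    exact hne (hw'x.trans hwx.symm)
  · intro hno
    have hall : ∀ x ∈ S.filter p, x = w := by
      intro x hx
      by_contra hne
      exact hno ⟨x, (List.mem_filter.mp hx).1, hne, (List.mem_filter.mp hx).2⟩
    have hcnt : (S.filter p).length = (S.filter p).count w := by
      symm; rw [List.count_eq_length]
      intro b hb; exact (hall b hb).symm
    have hle : (S.filter p).count w ≤ 1 := List.nodup_iff_count_le_one.mp hndf w
    have hge : 1 ≤ (S.filter p).count w := List.count_pos_iff.mpr hwf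
    omega

/-- B's counter at `w[:j+1]` reads 1 exactly when no other word shares that prefix
(`w` itself always contributes the 1). -/
theorem counts_getD_one_iff {words : List String} {w : String} {j : Nat}
    (hw : w ∈ words) (hj : j < w.toList.length) :
    ((PySem.Dict.counter (solPrefixes words)).getD
        (PySem.Str.slice w none (some ((j : Int) + 1))) 0 == 1) = true
      ↔ ¬ QPred words w (j + 1) := by
  rw [PySem.Dict.getD_counter]
  have hcount : List.count (PySem.Str.slice w none (some ((j : Int) + 1))) (solPrefixes words)
      = (PySem.Set.ofList words).countP
          (fun w' => decide (w.toList.take (j + 1) <+: w'.toList)) := by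
    unfold solPrefixes
    rw [List.count_flatMap]
    simp only [Function.comp_def]
    rw [List.map_congr_left (fun w' _ => count_prefixList (w' := w') hj)]
    have : (fun w' : String => if w.toList.take (j + 1) <+: w'.toList then 1 else 0)
        = (fun w' : String =>
            if (fun w'' : String => decide (w.toList.take (j + 1) <+: w''.toList)) w' = true
            then 1 else 0) := by
      funext w'; by_cases hC : w.toList.take (j + 1) <+: w'.toList <;> simp [hC]
    rw [this, PySem.List.sum_map_ite_one_zero_nat]
  rw [hcount]
  have h1 : ((((PySem.Set.ofList words).countP
      (fun w' => decide (w.toList.take (j + 1) <+: w'.toList))) : Int) == 1) = true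
      ↔ ((PySem.Set.ofList words).countP
          (fun w' => decide (w.toList.take (j + 1) <+: w'.toList))) = 1 := by
    rw [beq_iff_eq]; exact_mod_cast Iff.rfl
  rw [h1]
  rw [countP_nodup_one_iff (PySem.Set.nodup_ofList words)
    ((PySem.Set.mem_ofList words w).mpr hw)
    (by simpa using List.take_prefix (j + 1) w.toList)]
  constructor
  · intro hno ⟨w', hmem, hne, hpre⟩
    exact hno ⟨w', (PySem.Set.mem_ofList words w').mpr hmem, hne, by simpa using hpre⟩
  · intro hno ⟨w', hmem, hne, hpre⟩
    exact hno ⟨w', (PySem.Set.mem_ofList words w').mp hmem, hne, by simpa using hpre⟩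

/-- B's scan over `range' s n`, under the initial-segment characterisation of the counts. -/
theorem solCost_eq {counts : PySem.Dict String Int} {w : String} {N c : Nat}
    (hN : N = w.toList.length) (hc : c ≤ N)
    (hp : ∀ j, j < N →
      ((counts.getD (PySem.Str.slice w none (some ((j : Int) + 1))) 0 == 1) = true ↔ c ≤ j)) :
    ∀ n s, s ≤ c → s + n ≤ N →
      solCost counts w ((List.range' s n).map (fun (i : Nat) => (i : Int)))
        = if c < s + n then ((c : Int) + 1) else (N : Int) := by
  intro n
  induction n with
  | zero =>
    intro s hs hsn
    rw [if_neg (by omega)]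
    rw [List.range'_zero, List.map_nil]
    rw [solCost, PySem.Str.len_eq, hN]
  | succ n ih =>
    intro s hs hsn
    rw [List.range'_succ, List.map_cons, solCost]
    by_cases hcs : c = s
    · rw [if_pos ((hp s (by omega)).mpr (by omega))]
      rw [if_pos (by omega)]
      rw [hcs]
    · rw [if_neg (by
        intro hcond
        exact hcs (by have := (hp s (by omega)).mp hcond; omega))]
      rw [ih (s + 1) (by omega) (by omega)]
      by_cases hlt : c < s + (n + 1)
      · rw [if_pos (by omega), if_pos hlt]
      · rw [if_neg (by omega), if_neg hlt]

/-- The per-word contributions of the two programs agree. -/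
theorem contrib_eq {words : List String} {w : String} (hw : w ∈ words) (acc : Int) :
    (let st : Int × Bool :=
        (PySem.List.pyRange 0 (PySem.Str.len w)).foldl
          (fun st j =>
            if solInner words w j then
              (st.1 + 1, if j == PySem.Str.len w - 1 then true else st.2)
            else st)
          (acc, false)
     if st.2 != true then st.1 + 1 else st.1)
      = acc + max 1 (solCost (PySem.Dict.counter (solPrefixes words)) w
          (PySem.List.pyRange 0 (PySem.Str.len w))) := by
  have hNeq : PySem.Str.len w = ((w.toList.length : Nat) : Int) := PySem.Str.len_eq w
  set N := w.toList.length with hNdef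
  set q : Nat → Bool := fun k => decide (QPred words w (k + 1)) with hq
  set c : Nat := (List.range N).countP q with hc
  have hmono : ∀ k, q (k + 1) = true → q k = true := by
    intro k h
    simpa [hq] using QPred_antitone (by simpa [hq] using h)
  have hcle : c ≤ N := by
    simpa using List.countP_le_length (p := q) (l := List.range N)
  have hchar : ∀ k, k < N → (q k = true ↔ k < c) := fun k hk =>
    countP_antitone_iff hmono N k hk
  -- A's inner fold
  rw [foldA_eq (fun j => solInner words w j) (PySem.Str.len w - 1)]
  rw [hNeq, PySem.List.pyRange_zero_natCast, List.countP_map, List.any_map]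
  have hcntP : (List.range N).countP ((fun j : Int => solInner words w j) ∘ (fun k : Nat => (k : Int)))
      = c := by
    rw [hc]
    apply List.countP_congr
    intro k hk
    have hk' : k < N := List.mem_range.mp hk
    simp only [Function.comp_apply, hq]
    constructor
    · intro h; exact decide_eq_true ((solInner_iff hk').mp h)
    · intro h; exact (solInner_iff hk').mpr (of_decide_eq_true h)
  rw [hcntP]
  -- B's cost
  have hcost : solCost (PySem.Dict.counter (solPrefixes words)) w
        ((List.range N).map (fun k : Nat => (k : Int)))
      = if c < N then ((c : Int) + 1) else (N : Int) := by
    rw [List.range_eq_range']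
    have := solCost_eq (counts := PySem.Dict.counter (solPrefixes words)) (w := w)
      (N := N) (c := c) hNdef hcle
      (fun j hj => by
        rw [counts_getD_one_iff hw hj]
        rw [show (QPred words w (j + 1) ↔ q j = true) from by simp [hq]]
        rw [hchar j hj]
        omega) N 0 (by omega) (by omega)
    simpa using this
  rw [hcost]
  by_cases hN0 : N = 0
  · have hc0 : c = 0 := by omega
    rw [hc0, hN0]
    simp
  · -- the `r` flag equals `q (N-1)`
    have hany : (List.range N).any
          ((fun j : Int => solInner words w j && (j == (N : Int) - 1)) ∘ (fun k : Nat => (k : Int)))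
        = q (N - 1) := by
      rw [Bool.eq_iff_iff]
      rw [List.any_eq_true]
      constructor
      · rintro ⟨k, hk, hkand⟩
        have hk' : k < N := List.mem_range.mp hk
        simp only [Function.comp_apply, Bool.and_eq_true, beq_iff_eq] at hkand
        obtain ⟨hsol, hkeq⟩ := hkand
        have hkN : k = N - 1 := by omega
        subst hkN
        exact decide_eq_true ((solInner_iff hk').mp hsol)
      · intro hqN
        refine ⟨N - 1, List.mem_range.mpr (by omega), ?_⟩
        simp only [Function.comp_apply, Bool.and_eq_true, beq_iff_eq]
        refine ⟨(solInner_iff (by omega)).mpr (of_decide_eq_true hqN), by omega⟩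
    rw [hany]
    by_cases hcN : c = N
    · have hqN : q (N - 1) = true := (hchar (N - 1) (by omega)).mpr (by omega)
      rw [hqN]
      simp only [Bool.or_true, bne_self_eq_false, Bool.false_eq_true, if_false]
      rw [if_neg (by omega)]
      rw [max_eq_right (by omega : (1 : Int) ≤ (N : Int))]
      rw [hcN]
    · have hclt : c < N := by omega
      have hqN : q (N - 1) = false := by
        rw [Bool.eq_false_iff]
        intro h
        have := (hchar (N - 1) (by omega)).mp h
        omega
      rw [hqN]
      simp only [Bool.or_false]
      rw [if_pos hclt]
      rw [max_eq_right (by omega : (1 : Int) ≤ (c : Int) + 1)]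
      simp only [bne_iff_ne, ne_eq, Bool.false_eq_true, not_false_eq_true, if_true]
      ring

-- ===== VERDICT (by name: the statement is the Claim_ definition above) =====
theorem solution_spec : Claim_equal_solution := by
  intro words _
  unfold Spec_solution solution solution_alt
  by_cases hlen : (words.length == 1) = true
  · simp only [hlen, if_true]
  · simp only [hlen, Bool.false_eq_true, if_false]
    rw [PySem.Dict.foldl_insert_getD_add_one_eq_counter]
    apply PySem.List.foldl_congr_mem
    intro acc x hx
    exact contrib_eq hx acc
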